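-- pv_equiv track=rewrite | github.com/Kruzefiori/matricula_metaheuristica | src/modules/metaheuristic/AIS.py | get_occupied_slots
-- ===== SOURCE A (Python) =====
-- def get_occupied_slots(solution, disciplinesByDayAndTime):
--     occupied = set()
--     for disc in solution:
--         for day, times in disciplinesByDayAndTime.items():
--             for time, disciplines_at_time in times.items():
--                 if disc in disciplines_at_time:
--                     slot = f"{day}-{time}"
--                     occupied.add(slot)
--     return occupied
-- ===== SOURCE B (Python) =====
-- def get_occupied_slots(solution, disciplinesByDayAndTime):
--     # Invert the timetable once: discipline -> its "day-time" slots (in day/time order),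
--     # then a single lookup per discipline in the solution.
--     index = {}
--     for day, times in disciplinesByDayAndTime.items():
--         for time, disciplines_at_time in times.items():
--             slot = f"{day}-{time}"
--             for disc in dict.fromkeys(disciplines_at_time):
--                 index.setdefault(disc, []).append(slot)
--     occupied = set()
--     for disc in solution:
--         for slot in index.get(disc, []):
--             occupied.add(slot)
--     return occupied
-- ===== Notes on version B (the rewrite author's own statement) =====
-- stated objective: faster
-- what changed: B inverts the timetable once into a discipline-to-slots index and then does one lookup per solution entry, instead of rescanning every day/time cell (with a membership test over its discipline list) for each solution entry.
import Mathlib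
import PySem

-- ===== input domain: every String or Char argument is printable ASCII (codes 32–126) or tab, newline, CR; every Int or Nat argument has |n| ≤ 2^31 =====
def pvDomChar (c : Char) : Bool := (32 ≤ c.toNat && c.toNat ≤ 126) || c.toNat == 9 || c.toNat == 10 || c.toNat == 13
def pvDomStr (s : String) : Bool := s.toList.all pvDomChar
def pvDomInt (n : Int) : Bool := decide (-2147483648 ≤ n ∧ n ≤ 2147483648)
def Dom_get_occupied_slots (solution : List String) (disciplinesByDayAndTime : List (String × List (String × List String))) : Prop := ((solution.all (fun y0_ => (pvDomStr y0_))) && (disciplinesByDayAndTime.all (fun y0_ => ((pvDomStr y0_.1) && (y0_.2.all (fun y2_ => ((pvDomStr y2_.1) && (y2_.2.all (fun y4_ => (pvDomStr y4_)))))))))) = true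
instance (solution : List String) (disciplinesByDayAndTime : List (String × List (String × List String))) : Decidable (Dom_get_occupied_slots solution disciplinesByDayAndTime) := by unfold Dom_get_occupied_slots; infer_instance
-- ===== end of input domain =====

-- B builds a discipline→slots index once and looks each solution entry up, instead of
-- rescanning the whole timetable per entry (objective: faster; asymptotic change).


-- ===== PORT A =====
def get_occupied_slots (solution : List String) (disciplinesByDayAndTime : List (String × List (String × List String))) : List String :=
  solution.foldl (fun occupied disc =>
    disciplinesByDayAndTime.foldl (fun occupied dt =>
      dt.2.foldl (fun occupied tp =>
        if disc ∈ tp.2 then PySem.Set.add occupied (dt.1 ++ "-" ++ tp.1) else occupied)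
        occupied)
      occupied)
    PySem.Set.empty

-- ===== PORT B =====
def get_occupied_slots_alt (solution : List String) (disciplinesByDayAndTime : List (String × List (String × List String))) : List String :=
  let index : PySem.Dict String (List String) :=
    disciplinesByDayAndTime.foldl (fun index dt =>
      dt.2.foldl (fun index tp =>
        (PySem.List.dedup tp.2).foldl (fun index disc =>
          index.modify disc [] (· ++ [dt.1 ++ "-" ++ tp.1])) index)
        index)
      PySem.Dict.empty
  solution.foldl (fun occupied disc =>
    (index.getD disc []).foldl (fun occupied slot => PySem.Set.add occupied slot) occupied)
    PySem.Set.empty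

-- ===== PRECONDITION & SPEC =====
def Spec_get_occupied_slots (solution : List String) (disciplinesByDayAndTime : List (String × List (String × List String))) (out : List String) : Prop := out = get_occupied_slots_alt solution disciplinesByDayAndTime
instance (solution : List String) (disciplinesByDayAndTime : List (String × List (String × List String))) (out : List String) : Decidable (Spec_get_occupied_slots solution disciplinesByDayAndTime out) := by unfold Spec_get_occupied_slots; infer_instance

-- ===== CLAIM (what is proved, stated in full; the proofs are below) =====
def Claim_equal_get_occupied_slots : Prop := ∀ (solution : List String) (disciplinesByDayAndTime : List (String × List (String × List String))), Dom_get_occupied_slots solution disciplinesByDayAndTime → Spec_get_occupied_slots solution disciplinesByDayAndTime (get_occupied_slots solution disciplinesByDayAndTime)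

-- ===== LEMMAS AND PROOFS =====

-- The sequence of slots a given discipline contributes, in day/time order.
def slotsFor (disc : String) (dbt : List (String × List (String × List String))) : List String :=
  dbt.flatMap (fun dt => dt.2.flatMap (fun tp =>
    if disc ∈ tp.2 then [dt.1 ++ "-" ++ tp.1] else []))

-- A's inner double loop for one discipline is a fold of Set.add over slotsFor.
theorem a_inner_eq (disc : String) (dbt : List (String × List (String × List String)))
    (occ : List String) :
    dbt.foldl (fun occupied dt =>
      dt.2.foldl (fun occupied tp =>
        if disc ∈ tp.2 then PySem.Set.add occupied (dt.1 ++ "-" ++ tp.1) else occupied)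
        occupied) occ
    = (slotsFor disc dbt).foldl (fun o s => PySem.Set.add o s) occ := by
  induction dbt generalizing occ with
  | nil => simp [slotsFor]
  | cons dt rest ih =>
    simp only [List.foldl_cons, slotsFor, List.flatMap_cons, List.foldl_append]
    rw [ih]
    congr 1
    induction dt.2 generalizing occ with
    | nil => simp
    | cons tp ts ih2 =>
      simp only [List.foldl_cons, List.flatMap_cons, List.foldl_append]
      rw [ih2]
      congr 1
      by_cases h : disc ∈ tp.2 <;> simp [h]

-- One cell's dedup loop appends this cell's contribution to each index entry.
theorem cell_getD (disc : String) (slot : String) (discs : List String)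
    (d : PySem.Dict String (List String)) :
    ((PySem.List.dedup discs).foldl (fun index dx =>
        index.modify dx [] (· ++ [slot])) d).getD disc []
    = d.getD disc [] ++ (if disc ∈ discs then [slot] else []) := by
  have hrw : (PySem.List.dedup discs).foldl (fun index dx =>
        index.modify dx [] (· ++ [slot])) d
      = ((PySem.List.dedup discs).map (fun dx => (dx, slot))).foldl
          (fun index p => index.modify p.1 [] (· ++ [p.2])) d := by
    rw [List.foldl_map]
  have hnd := PySem.List.nodup_dedup (xs := discs)
  have hmem := PySem.List.mem_dedup (x := disc) (xs := discs)
  have hfil : (PySem.List.dedup discs).filter (· == disc)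
      = if disc ∈ discs then [disc] else [] := by
    rw [List.filter_beq]
    by_cases h : disc ∈ discs
    · rw [if_pos h, List.count_eq_one_of_mem hnd (hmem.mpr h), List.replicate_one]
    · rw [if_neg h, List.count_eq_zero.mpr (fun hc => h (hmem.mp hc)), List.replicate_zero]
  rw [hrw, PySem.Dict.getD_foldl_modify_append]
  congr 1
  simp only [List.filter_map, List.map_map, Function.comp_def]
  rw [hfil]
  by_cases h : disc ∈ discs <;> simp [h]

-- The full index maps each discipline to exactly its slotsFor list.
theorem index_getD (disc : String) (dbt : List (String × List (String × List String)))
    (d : PySem.Dict String (List String)) :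
    (dbt.foldl (fun index dt =>
      dt.2.foldl (fun index tp =>
        (PySem.List.dedup tp.2).foldl (fun index dx =>
          index.modify dx [] (· ++ [dt.1 ++ "-" ++ tp.1])) index)
        index) d).getD disc []
    = d.getD disc [] ++ slotsFor disc dbt := by
  induction dbt generalizing d with
  | nil => simp [slotsFor]
  | cons dt rest ih =>
    simp only [List.foldl_cons, slotsFor, List.flatMap_cons]
    rw [ih]
    have hinner : ∀ (d : PySem.Dict String (List String)),
        (dt.2.foldl (fun index tp =>
          (PySem.List.dedup tp.2).foldl (fun index dx =>
            index.modify dx [] (· ++ [dt.1 ++ "-" ++ tp.1])) index) d).getD disc []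
        = d.getD disc [] ++ dt.2.flatMap (fun tp =>
            if disc ∈ tp.2 then [dt.1 ++ "-" ++ tp.1] else []) := by
      induction dt.2 with
      | nil => simp
      | cons tp ts ih2 =>
        intro d
        simp only [List.foldl_cons, List.flatMap_cons]
        rw [ih2, cell_getD, List.append_assoc]
    rw [hinner, slotsFor, List.append_assoc]

-- ===== VERDICT (by name: the statement is the Claim_ definition above) =====
theorem get_occupied_slots_spec : Claim_equal_get_occupied_slots := by
  intro solution dbt _
  unfold Spec_get_occupied_slots get_occupied_slots get_occupied_slots_alt
  simp only []
  apply PySem.List.foldl_congr_mem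
  intro acc disc _
  rw [a_inner_eq, index_getD]
  simp
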